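-- pv_equiv track=rewrite | github.com/MPMG-DCC-UFMG/M01 | preprocessing/text_cleaner.py | merge_sentences
-- ===== SOURCE A (Python) =====
-- def merge_sentences(sentences):
--     new_sents = []
--     acc = ""
--     for sentence in sentences:
--         sent = sentence.strip()
--         if len(sent) < 1:
--             continue
--         if sent[0].isupper():
--             if acc != "":
--                 new_sents.append(acc.strip())
--             acc = ""
--         acc += " " + sent
--     new_sents.append(acc.strip())
--     return new_sents
-- ===== SOURCE B (Python) =====
-- def merge_sentences(sentences):
--     # Pre-clean once, then split the cleaned list into runs at uppercase-starting
--     # sentences and join each run; no growing string accumulator.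
--     cleaned = [t for t in (s.strip() for s in sentences) if t]
--     if not cleaned:
--         return ['']
--     return _groups(cleaned)
--
--
-- def _groups(xs):
--     # xs is non-empty; first group = xs[0] plus the following sentences that do
--     # not start with an uppercase letter, then recurse on the remainder.
--     head, rest0 = xs[0], xs[1:]
--     i = 0
--     while i < len(rest0) and not rest0[i][0].isupper():
--         i += 1
--     run = [head] + rest0[:i]
--     rest = rest0[i:]
--     out = [' '.join(run)]
--     if rest:
--         out += _groups(rest)
--     return out
-- ===== Notes on version B (the rewrite author's own statement) =====
-- stated objective: alternative
-- what changed: Replaces A's single growing string accumulator and flush-on-uppercase flag logic with a two-phase algorithm: strip/filter once into a cleaned list, then recursively split it into runs at uppercase-starting sentences and join each run once.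
import Mathlib
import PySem

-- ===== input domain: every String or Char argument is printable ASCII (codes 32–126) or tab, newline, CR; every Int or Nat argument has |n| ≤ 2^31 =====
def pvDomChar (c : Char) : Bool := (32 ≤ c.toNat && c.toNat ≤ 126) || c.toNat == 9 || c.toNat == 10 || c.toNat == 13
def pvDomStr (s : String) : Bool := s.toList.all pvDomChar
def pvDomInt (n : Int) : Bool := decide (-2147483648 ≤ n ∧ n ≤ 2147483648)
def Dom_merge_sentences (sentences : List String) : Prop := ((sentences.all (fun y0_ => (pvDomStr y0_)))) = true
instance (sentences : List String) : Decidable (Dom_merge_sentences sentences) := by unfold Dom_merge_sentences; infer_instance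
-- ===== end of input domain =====

-- B replaces A's growing string accumulator by a clean-then-split-into-runs recursion; objective: alternative (same cost).

-- ===== PORT A =====
-- shared one-liner: sent[0].isupper() on a non-empty sentence
def upperHead (t : List Char) : Bool := PySem.Chars.isupper (t.headD ' ')

-- the body of A's for-loop; state = (new_sents, acc)
def aStep (p : List String × List Char) (sentence : String) : List String × List Char :=
  let sent := PySem.Chars.strip sentence.toList
  if sent.length < 1 then p
  else
    let p1 := if upperHead sent then
        ((if p.2 ≠ [] then p.1 ++ [String.mk (PySem.Chars.strip p.2)] else p.1), ([] : List Char))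
      else p
    (p1.1, p1.2 ++ ' ' :: sent)

def merge_sentences (sentences : List String) : List String :=
  let p := sentences.foldl aStep ([], ([] : List Char))
  p.1 ++ [String.mk (PySem.Chars.strip p.2)]

-- ===== PORT B =====
-- cleaned = [t for t in (s.strip() for s in sentences) if t]
def cleanB (sentences : List String) : List (List Char) :=
  (sentences.map (fun s => PySem.Chars.strip s.toList)).filter (fun t => !t.isEmpty)

-- _groups: the while loop computes the longest prefix of rest0 whose sentences do
-- not start uppercase (= takeWhile), and rest0[i:] is the corresponding dropWhile
def groupsB : List (List Char) → List String
  | [] => []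
  | x :: rest0 =>
    let run := x :: rest0.takeWhile (fun t => !upperHead t)
    let rest := rest0.dropWhile (fun t => !upperHead t)
    String.mk (PySem.Chars.join [' '] run) :: (if rest.isEmpty then [] else groupsB rest)
termination_by xs => xs.length
decreasing_by
  exact Nat.lt_succ_of_le (List.length_dropWhile_le _ _)

def merge_sentences_alt (sentences : List String) : List String :=
  let cleaned := cleanB sentences
  if cleaned.isEmpty then [""] else groupsB cleaned

-- ===== PRECONDITION & SPEC =====
def Spec_merge_sentences (sentences : List String) (out : List String) : Prop := out = merge_sentences_alt sentences
instance (sentences : List String) (out : List String) : Decidable (Spec_merge_sentences sentences out) := by unfold Spec_merge_sentences; infer_instance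

-- ===== CLAIM (what is proved, stated in full; the proofs are below) =====
def Claim_equal_merge_sentences : Prop := ∀ (sentences : List String), Dom_merge_sentences sentences → Spec_merge_sentences sentences (merge_sentences sentences)

-- ===== LEMMAS AND PROOFS =====

-- A's loop body once the strip/skip of empties is factored out (proof-only helper)
def cStep (p : List String × List Char) (sent : List Char) : List String × List Char :=
  let p1 := if upperHead sent then
      ((if p.2 ≠ [] then p.1 ++ [String.mk (PySem.Chars.strip p.2)] else p.1), ([] : List Char))
    else p
  (p1.1, p1.2 ++ ' ' :: sent)

-- A's accumulator for the current run r: " s1 s2 … sk"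
def sepJoin (r : List (List Char)) : List Char := r.flatMap (fun t => ' ' :: t)

-- a cleaned sentence: non-empty, no whitespace at either end
def cleanT (t : List Char) : Prop :=
  t ≠ [] ∧ (∀ c ∈ t.head?, PySem.Chars.isspace c = false)
         ∧ (∀ c ∈ t.getLast?, PySem.Chars.isspace c = false)

theorem aStep_eq (p : List String × List Char) (s : String) :
    aStep p s = if PySem.Chars.strip s.toList = [] then p else cStep p (PySem.Chars.strip s.toList) := by
  unfold aStep cStep
  rcases h : PySem.Chars.strip s.toList with _ | ⟨c, cs⟩ <;> simp

theorem foldA_eq_foldC (ss : List String) (p : List String × List Char) :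
    ss.foldl aStep p = (cleanB ss).foldl cStep p := by
  induction ss generalizing p with
  | nil => rfl
  | cons s ss ih =>
    simp only [List.foldl_cons, cleanB, List.map_cons, List.filter_cons]
    by_cases h : PySem.Chars.strip s.toList = []
    · simp [aStep_eq, h, ih, cleanB]
    · simp [aStep_eq, h, ih, cleanB]

theorem head?_dropWhile_nospace (l : List Char) (c : Char)
    (h : (List.dropWhile PySem.Chars.isspace l).head? = some c) : PySem.Chars.isspace c = false := by
  induction l with
  | nil => simp at h
  | cons a l ih =>
    by_cases ha : PySem.Chars.isspace a
    · rw [List.dropWhile_cons_of_pos ha] at h; exact ih h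
    · rw [List.dropWhile_cons_of_neg ha] at h
      simp at h; subst h; simpa using ha

theorem head?_of_prefix {t y : List Char} (h : t <+: y) (ht : t ≠ []) : y.head? = t.head? := by
  obtain ⟨u, rfl⟩ := h
  cases t with
  | nil => exact absurd rfl ht
  | cons a t => simp

-- getLast? of an append with non-empty right part, via reverse/head?
theorem getLast?_append_right' {α : Type} (u t : List α) (ht : t ≠ []) :
    (u ++ t).getLast? = t.getLast? := by
  rw [← List.head?_reverse, ← List.head?_reverse, List.reverse_append]
  cases htr : t.reverse with
  | nil => exact absurd (by simpa using htr) ht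
  | cons a t' => simp

theorem head?_strip_nospace (l : List Char) (c : Char)
    (h : (PySem.Chars.strip l).head? = some c) : PySem.Chars.isspace c = false := by
  unfold PySem.Chars.strip PySem.Chars.rstrip PySem.Chars.lstrip at h
  set y := List.dropWhile PySem.Chars.isspace l with hy
  have hpre : (List.dropWhile PySem.Chars.isspace y.reverse).reverse <+: y := by
    obtain ⟨u, hu⟩ := List.dropWhile_suffix (l := y.reverse) (p := PySem.Chars.isspace)
    refine ⟨u.reverse, ?_⟩
    have := congrArg List.reverse hu
    simpa using this
  have hne : (List.dropWhile PySem.Chars.isspace y.reverse).reverse ≠ [] := by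
    intro hnil; rw [hnil] at h; simp at h
  rw [← head?_of_prefix hpre hne] at h
  exact head?_dropWhile_nospace l c h

theorem getLast?_strip_nospace (l : List Char) (c : Char)
    (h : (PySem.Chars.strip l).getLast? = some c) : PySem.Chars.isspace c = false := by
  unfold PySem.Chars.strip PySem.Chars.rstrip at h
  rw [List.getLast?_reverse] at h
  exact head?_dropWhile_nospace _ c h

theorem cleanB_clean (ss : List String) : ∀ t ∈ cleanB ss, cleanT t := by
  intro t ht
  unfold cleanB at ht
  rw [List.mem_filter] at ht
  obtain ⟨hmem, hne⟩ := ht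
  rw [List.mem_map] at hmem
  obtain ⟨s, _, rfl⟩ := hmem
  refine ⟨by simpa [List.isEmpty_iff] using hne, ?_, ?_⟩
  · intro c hc; exact head?_strip_nospace _ c (by simpa using hc)
  · intro c hc; exact getLast?_strip_nospace _ c (by simpa using hc)

theorem sepJoin_cons (t : List Char) (r : List (List Char)) :
    sepJoin (t :: r) = ' ' :: (t ++ sepJoin r) := by
  simp [sepJoin]

theorem sepJoin_append_singleton (r : List (List Char)) (t : List Char) :
    sepJoin r ++ ' ' :: t = sepJoin (r ++ [t]) := by
  simp [sepJoin]

theorem join_eq_sep (r : List (List Char)) (t : List Char) :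
    PySem.Chars.join [' '] (t :: r) = t ++ sepJoin r := by
  induction r generalizing t with
  | nil => simp [PySem.Chars.join_singleton, sepJoin]
  | cons u r ih =>
    rw [PySem.Chars.join_cons_cons, ih, sepJoin_cons]
    simp

theorem dropWhile_eq_self_of_head {p : Char → Bool} {l : List Char}
    (h : ∀ c ∈ l.head?, p c = false) : List.dropWhile p l = l := by
  cases l with
  | nil => rfl
  | cons a l => exact List.dropWhile_cons_of_neg (by simpa using h a (by simp))

theorem join_ne_nil (t : List Char) (r : List (List Char)) (ht : t ≠ []) :
    PySem.Chars.join [' '] (t :: r) ≠ [] := by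
  rw [join_eq_sep]
  intro h
  exact ht (by simpa using (List.append_eq_nil_iff.mp h).1)

theorem join_head? (t : List Char) (r : List (List Char)) (ht : t ≠ []) :
    (PySem.Chars.join [' '] (t :: r)).head? = t.head? := by
  rw [join_eq_sep]
  cases t with
  | nil => exact absurd rfl ht
  | cons a t => simp

theorem join_getLast?_nospace (r : List (List Char)) (t : List Char)
    (hc : ∀ u ∈ t :: r, cleanT u) :
    ∀ c ∈ (PySem.Chars.join [' '] (t :: r)).getLast?, PySem.Chars.isspace c = false := by
  induction r generalizing t with
  | nil =>
    intro c hcl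
    exact (hc t (by simp)).2.2 c (by simpa [PySem.Chars.join_singleton] using hcl)
  | cons u r ih =>
    intro c hcl
    rw [PySem.Chars.join_cons_cons] at hcl
    have hne : PySem.Chars.join [' '] (u :: r) ≠ [] :=
      join_ne_nil u r (hc u (by simp)).1
    rw [getLast?_append_right' _ _ hne] at hcl
    exact ih u (fun v hv => hc v (by simpa using Or.inr hv)) c hcl

theorem strip_join (r : List (List Char)) (t : List Char)
    (hc : ∀ u ∈ t :: r, cleanT u) :
    PySem.Chars.strip (sepJoin (t :: r)) = PySem.Chars.join [' '] (t :: r) := by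
  rw [sepJoin_cons, ← join_eq_sep]
  set j := PySem.Chars.join [' '] (t :: r) with hj
  unfold PySem.Chars.strip PySem.Chars.lstrip PySem.Chars.rstrip
  have hsp : PySem.Chars.isspace ' ' = true := by decide
  rw [List.dropWhile_cons_of_pos hsp]
  have hl : List.dropWhile PySem.Chars.isspace j = j := by
    apply dropWhile_eq_self_of_head
    intro c hcl
    rw [hj, join_head? t r (hc t (by simp)).1] at hcl
    exact (hc t (by simp)).2.1 c hcl
  rw [hl]
  have hr : List.dropWhile PySem.Chars.isspace j.reverse = j.reverse := by
    apply dropWhile_eq_self_of_head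
    intro c hcl
    rw [List.head?_reverse] at hcl
    exact join_getLast?_nospace r t hc c hcl
  rw [hr, List.reverse_reverse]

theorem takeWhile_all_append {p : List Char → Bool} (l1 l2 : List (List Char))
    (h : ∀ x ∈ l1, p x = true) : (l1 ++ l2).takeWhile p = l1 ++ l2.takeWhile p := by
  induction l1 with
  | nil => simp
  | cons a l1 ih =>
    rw [List.cons_append, List.takeWhile_cons_of_pos (h a (by simp))]
    simp [ih (fun x hx => h x (by simp [hx]))]

theorem dropWhile_all_append {p : List Char → Bool} (l1 l2 : List (List Char))
    (h : ∀ x ∈ l1, p x = true) : (l1 ++ l2).dropWhile p = l2.dropWhile p := by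
  induction l1 with
  | nil => simp
  | cons a l1 ih =>
    rw [List.cons_append, List.dropWhile_cons_of_pos (h a (by simp))]
    exact ih (fun x hx => h x (by simp [hx]))

theorem mainL (c : List (List Char)) :
    ∀ (ns : List String) (t : List Char) (rt : List (List Char)),
      (∀ u ∈ t :: rt, cleanT u) → (∀ u ∈ c, cleanT u) →
      (∀ u ∈ rt, upperHead u = false) →
      (let p := c.foldl cStep (ns, sepJoin (t :: rt));
        p.1 ++ [String.mk (PySem.Chars.strip p.2)]) = ns ++ groupsB ((t :: rt) ++ c) := by
  induction c with
  | nil =>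
    intro ns t rt hr _ htl
    simp only [List.foldl_nil, List.append_nil]
    rw [strip_join rt t hr]
    have htake : rt.takeWhile (fun u => !upperHead u) = rt :=
      List.takeWhile_eq_self_iff.mpr (by intro x hx; simp [htl x hx])
    have hdrop : rt.dropWhile (fun u => !upperHead u) = [] :=
      List.dropWhile_eq_nil_iff.mpr (by intro x hx; simp [htl x hx])
    simp [groupsB, htake, hdrop]
  | cons x c' ih =>
    intro ns t rt hr hc htl
    simp only [List.foldl_cons]
    by_cases hu : upperHead x
    · have hflush : cStep (ns, sepJoin (t :: rt)) x =
          (ns ++ [String.mk (PySem.Chars.strip (sepJoin (t :: rt)))], sepJoin [x]) := by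
        simp [cStep, hu, sepJoin]
      rw [hflush]
      have hih := ih (ns ++ [String.mk (PySem.Chars.strip (sepJoin (t :: rt)))]) x []
        (by intro u hus; simp at hus; subst hus; exact hc _ (by simp))
        (fun u hus => hc u (by simp [hus])) (by simp)
      rw [hih, strip_join rt t hr]
      have h1 : (rt ++ x :: c').takeWhile (fun u => !upperHead u) = rt := by
        rw [takeWhile_all_append rt (x :: c') (by intro v hv; simp [htl v hv])]
        rw [List.takeWhile_cons_of_neg (by simp [hu])]
        simp
      have h2 : (rt ++ x :: c').dropWhile (fun u => !upperHead u) = x :: c' := by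
        rw [dropWhile_all_append rt (x :: c') (by intro v hv; simp [htl v hv])]
        exact List.dropWhile_cons_of_neg (by simp [hu])
      rw [List.cons_append]
      simp [groupsB, h1, h2, List.append_assoc]
    · have hkeep : cStep (ns, sepJoin (t :: rt)) x = (ns, sepJoin ((t :: rt) ++ [x])) := by
        simp only [cStep, hu, if_neg, Bool.not_eq_true]
        simp [sepJoin_append_singleton]
      rw [hkeep]
      have hih := ih ns t (rt ++ [x])
        (by
          intro u hus
          rcases List.mem_cons.mp hus with h | h
          · subst h; exact hr _ (by simp)
          · rcases List.mem_append.mp h with h | h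
            · exact hr u (by simp [h])
            · simp at h; subst h; exact hc _ (by simp))
        (fun u hus => hc u (by simp [hus]))
        (by
          intro u hus
          rcases List.mem_append.mp hus with h | h
          · exact htl u h
          · simp at h; subst h; simpa using hu)
      rw [List.cons_append, List.append_assoc] at hih
      simpa using hih

theorem cStep_nil_acc (ns : List String) (t : List Char) :
    cStep (ns, []) t = (ns, ' ' :: t) := by
  simp [cStep]

-- ===== VERDICT (by name: the statement is the Claim_ definition above) =====
theorem merge_sentences_spec : Claim_equal_merge_sentences := by
  intro sentences _
  unfold Spec_merge_sentences
  simp only [merge_sentences, merge_sentences_alt]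
  rw [foldA_eq_foldC]
  rcases h : cleanB sentences with _ | ⟨t, c⟩
  · simp [PySem.Chars.strip, PySem.Chars.lstrip, PySem.Chars.rstrip]
    rfl
  · have hclean := cleanB_clean sentences
    rw [h] at hclean
    simp only [List.foldl_cons, cStep_nil_acc, List.isEmpty_cons]
    have hsep : (' ' :: t : List Char) = sepJoin [t] := by simp [sepJoin]
    rw [hsep]
    have hm := mainL c [] t []
      (by intro u hus; simp at hus; subst hus; exact hclean _ (by simp))
      (fun u hus => hclean u (by simp [hus])) (by simp)
    simpa using hm
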